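-- pv_equiv track=rewrite | github.com/CMU-17-356/TEAM-777 | backend/auth/billSplit.py | calculate_net_balances
-- ===== SOURCE A (Python) =====
-- def calculate_net_balances(balance_record):
--     """Calculate net balances for each person and minimize transactions."""
--     # Calculate net position for each person
--     net_positions = {}
--     for person in balance_record:
--         net_positions[person] = sum(balance_record[person].values())
--
--     # Separate into receivers (positive) and payers (negative)
--     receivers = {p: v for p, v in net_positions.items() if v > 0}
--     payers = {p: v for p, v in net_positions.items() if v < 0}
--
--     # Initialize minimized transactions
--     minimized_balances = {}
--     for person in balance_record:
--         minimized_balances[person] = {}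
--
--     # Match payers to receivers to minimize transactions
--     for payer, amount in payers.items():
--         remaining_amount = abs(amount)
--         for receiver, receive_amount in receivers.items():
--             if remaining_amount <= 0:
--                 break
--             if receive_amount > 0:
--                 transfer_amount = min(remaining_amount, receive_amount)
--                 minimized_balances[payer][receiver] = transfer_amount
--                 minimized_balances[receiver][payer] = -transfer_amount
--                 remaining_amount -= transfer_amount
--                 receivers[receiver] -= transfer_amount
--
--     return minimized_balances
-- ===== SOURCE B (Python) =====
-- def calculate_net_balances(balance_record):
--     """Calculate net balances for each person and minimize transactions (two-pointer sweep)."""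
--     net = {p: sum(inner.values()) for p, inner in balance_record.items()}
--     receivers = [(p, v) for p, v in net.items() if v > 0]
--     payers = [(p, v) for p, v in net.items() if v < 0]
--     out = {p: {} for p in net}
--     j = 0
--     cap = receivers[0][1] if receivers else 0
--     for payer, amount in payers:
--         need = -amount
--         while need > 0 and j < len(receivers):
--             r = receivers[j][0]
--             t = min(need, cap)
--             out[payer][r] = t
--             out[r][payer] = -t
--             need -= t
--             cap -= t
--             if cap == 0:
--                 j += 1
--                 cap = receivers[j][1] if j < len(receivers) else 0
--     return out
-- ===== Notes on version B (the rewrite author's own statement) =====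
-- stated objective: alternative
-- what changed: Replaced the per-payer rescan of the whole receivers dict with a single two-pointer sweep: receivers are kept as a list with a cursor and a remaining-capacity counter, so each receiver is visited once overall instead of once per payer in the matching phase.
import Mathlib
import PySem

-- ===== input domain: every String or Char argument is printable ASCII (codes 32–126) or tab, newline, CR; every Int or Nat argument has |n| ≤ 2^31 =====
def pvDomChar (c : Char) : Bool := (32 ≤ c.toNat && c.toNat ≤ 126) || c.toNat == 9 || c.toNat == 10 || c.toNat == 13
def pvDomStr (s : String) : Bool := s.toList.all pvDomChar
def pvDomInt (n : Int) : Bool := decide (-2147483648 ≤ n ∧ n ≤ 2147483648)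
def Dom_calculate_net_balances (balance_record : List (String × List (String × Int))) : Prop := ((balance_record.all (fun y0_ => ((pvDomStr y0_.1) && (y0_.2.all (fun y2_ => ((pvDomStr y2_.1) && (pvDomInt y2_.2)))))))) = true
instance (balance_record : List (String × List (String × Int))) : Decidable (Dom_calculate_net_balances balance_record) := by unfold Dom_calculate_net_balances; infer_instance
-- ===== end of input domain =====

-- B replaces A's per-payer rescan of the receivers dict with a two-pointer sweep over the
-- receivers list (cursor + remaining capacity); both return the same dict of dicts.

-- ===== PORT A =====
-- one inner-loop step of A: state = (minimized_balances, receivers dict, remaining_amount);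
-- the `remaining_amount <= 0` branch models A's `break` (A's state never changes after it)
def pvAStep (payer : String)
    (acc : PySem.Dict String (PySem.Dict String Int) × PySem.Dict String Int × Int)
    (rv : String × Int) :
    PySem.Dict String (PySem.Dict String Int) × PySem.Dict String Int × Int :=
  if acc.2.2 ≤ 0 then acc
  else if 0 < rv.2 then
    let t := min acc.2.2 rv.2
    let m := (acc.1.modify payer PySem.Dict.empty (fun inner => inner.insert rv.1 t)).modify
        rv.1 PySem.Dict.empty (fun inner => inner.insert payer (-t))
    (m, acc.2.1.insert rv.1 (acc.2.1.getD rv.1 0 - t), acc.2.2 - t)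
  else acc

-- one outer-loop step of A: iterate the snapshot of receivers.items() for one payer
def pvAPayer
    (st : PySem.Dict String (PySem.Dict String Int) × PySem.Dict String Int)
    (pa : String × Int) :
    PySem.Dict String (PySem.Dict String Int) × PySem.Dict String Int :=
  let r := st.2.items.foldl (pvAStep pa.1) (st.1, st.2, |pa.2|)
  (r.1, r.2.1)

def calculate_net_balances (balance_record : List (String × List (String × Int))) :
    List (String × List (String × Int)) :=
  let d := PySem.Dict.ofList balance_record
  let net_positions := d.items.foldl
      (fun np (p : String × List (String × Int)) =>
        np.insert p.1 (PySem.Dict.ofList p.2).values.sum) PySem.Dict.empty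
  let receivers := PySem.Dict.mk (net_positions.items.filter (fun pv => decide (0 < pv.2)))
  let payers := PySem.Dict.mk (net_positions.items.filter (fun pv => decide (pv.2 < 0)))
  let m0 := d.items.foldl
      (fun m (p : String × List (String × Int)) =>
        m.insert p.1 (PySem.Dict.empty : PySem.Dict String Int)) PySem.Dict.empty
  let res := payers.items.foldl pvAPayer (m0, receivers)
  res.1.items.map (fun p => (p.1, p.2.items))

-- ===== PORT B =====
-- B's while-loop: receivers list with cursor j and remaining capacity cap of receiver j
def pvBStep (recs : List (String × Int)) (payer : String)
    (out : PySem.Dict String (PySem.Dict String Int)) (j : Nat) (cap need : Int) :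
    PySem.Dict String (PySem.Dict String Int) × Nat × Int :=
  if h : 0 < need ∧ j < recs.length then
    let r := (recs[j]'h.2).1
    let t := min need cap
    let out := (out.modify payer PySem.Dict.empty (fun inner => inner.insert r t)).modify r
        PySem.Dict.empty (fun inner => inner.insert payer (-t))
    if cap - t = 0 then
      pvBStep recs payer out (j + 1)
        (if h2 : j + 1 < recs.length then (recs[j + 1]'h2).2 else 0) (need - t)
    else
      pvBStep recs payer out j (cap - t) (need - t)
  else (out, j, cap)
termination_by (recs.length - j, need.toNat)
decreasing_by
  · exact Prod.Lex.left _ _ (by omega)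
  · exact Prod.Lex.right _ (by omega)

def calculate_net_balances_alt (balance_record : List (String × List (String × Int))) :
    List (String × List (String × Int)) :=
  let d := PySem.Dict.ofList balance_record
  let net := PySem.Dict.mk (d.items.map (fun p => (p.1, (PySem.Dict.ofList p.2).values.sum)))
  let receivers := net.items.filter (fun pv => decide (0 < pv.2))
  let payers := net.items.filter (fun pv => decide (pv.2 < 0))
  let out0 := PySem.Dict.mk (net.items.map (fun p => (p.1, (PySem.Dict.empty : PySem.Dict String Int))))
  let cap0 := if h : 0 < receivers.length then (receivers[0]'h).2 else 0
  let fin := payers.foldl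
      (fun st pa => pvBStep receivers pa.1 st.1 st.2.1 st.2.2 (-pa.2)) (out0, 0, cap0)
  fin.1.items.map (fun p => (p.1, p.2.items))

-- ===== PRECONDITION & SPEC =====
def Spec_calculate_net_balances (balance_record : List (String × List (String × Int))) (out : List (String × List (String × Int))) : Prop := out = calculate_net_balances_alt balance_record
instance (balance_record : List (String × List (String × Int))) (out : List (String × List (String × Int))) : Decidable (Spec_calculate_net_balances balance_record out) := by unfold Spec_calculate_net_balances; infer_instance

-- ===== CLAIM (what is proved, stated in full; the proofs are below) =====
def Claim_equal_calculate_net_balances : Prop := ∀ (balance_record : List (String × List (String × Int))), Dom_calculate_net_balances balance_record → Spec_calculate_net_balances balance_record (calculate_net_balances balance_record)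

-- ===== LEMMAS AND PROOFS =====

-- the receivers dict of A after B has advanced to cursor j with capacity cap:
-- receivers 0..j-1 are drained to 0, receiver j holds cap, the rest are untouched
def pvTail (recs : List (String × Int)) (j : Nat) (cap : Int) : List (String × Int) :=
  match recs.drop j with
  | [] => []
  | p :: rest => (p.1, cap) :: rest

def pvRecs (recs : List (String × Int)) (j : Nat) (cap : Int) : List (String × Int) :=
  (recs.take j).map (fun p => (p.1, (0 : Int))) ++ pvTail recs j cap

lemma pvAStep_skip_need {payer acc rv} (h : acc.2.2 ≤ 0) : pvAStep payer acc rv = acc := by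
  simp [pvAStep, h]

lemma pvFoldA_skip_need (payer : String) (l : List (String × Int)) (acc)
    (h : acc.2.2 ≤ 0) : l.foldl (pvAStep payer) acc = acc := by
  induction l with
  | nil => rfl
  | cons p l ih => rw [List.foldl_cons, pvAStep_skip_need h, ih]

lemma pvFoldA_skip_zeros (payer : String) (l : List (String × Int)) (acc)
    (h : ∀ p ∈ l, p.2 ≤ 0) : l.foldl (pvAStep payer) acc = acc := by
  induction l with
  | nil => rfl
  | cons p l ih =>
      have hp : pvAStep payer acc p = acc := by
        have := h p (List.mem_cons_self ..)
        simp only [pvAStep]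
        split
        · rfl
        · rw [if_neg (by omega)]
      rw [List.foldl_cons, hp, ih (fun q hq => h q (List.mem_cons_of_mem _ hq))]

lemma pv_foldl_insert {β ν : Type} (l : List (String × β)) (f : String × β → ν)
    (h : (l.map Prod.fst).Nodup) :
    l.foldl (fun d p => d.insert p.1 (f p)) PySem.Dict.empty
      = PySem.Dict.mk (l.map (fun p => (p.1, f p))) := by
  apply PySem.Dict.ext
  rw [PySem.Dict.items_foldl_insert_fresh l Prod.fst (fun p => f p) PySem.Dict.empty
    (fun a _ => PySem.Dict.contains_empty _) h]
  rfl

lemma pv_mk_get? (Z R : List (String × Int)) (k : String) (v : Int)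
    (hZ : ∀ p ∈ Z, p.1 ≠ k) :
    (PySem.Dict.mk (Z ++ (k, v) :: R)).get? k = some v := by
  induction Z with
  | nil => simp [PySem.Dict.get?_mk_cons]
  | cons p Z ih =>
      have hp : p.1 ≠ k := hZ p (List.mem_cons_self ..)
      rw [List.cons_append, PySem.Dict.get?_mk_cons, if_neg (by simpa using hp)]
      exact ih (fun q hq => hZ q (List.mem_cons_of_mem _ hq))

lemma pv_mk_insert (Z R : List (String × Int)) (k : String) (v c' : Int)
    (hZ : ∀ p ∈ Z, p.1 ≠ k) (hR : ∀ p ∈ R, p.1 ≠ k) :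
    (PySem.Dict.mk (Z ++ (k, v) :: R)).insert k c' = PySem.Dict.mk (Z ++ (k, c') :: R) := by
  apply PySem.Dict.ext
  have hc : (PySem.Dict.mk (Z ++ (k, v) :: R)).contains k = true := by
    rw [PySem.Dict.contains_eq_isSome_get?, pv_mk_get? Z R k v hZ]; rfl
  rw [PySem.Dict.items_insert_of_contains _ _ hc]
  show (Z ++ (k, v) :: R).map (fun p => if p.1 == k then (k, c') else p) = Z ++ (k, c') :: R
  rw [List.map_append, List.map_cons]
  congr 1
  · rw [List.map_congr_left (g := id) (fun p hp => by simp [hZ p hp]), List.map_id]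
  · rw [if_pos (by simp)]
    congr 1
    rw [List.map_congr_left (g := id) (fun p hp => by simp [hR p hp]), List.map_id]

lemma pvRecs_split (recs : List (String × Int)) (j : Nat) (hj : j < recs.length) (cap : Int) :
    pvRecs recs j cap
      = (recs.take j).map (fun p => (p.1, (0 : Int))) ++ ((recs[j]'hj).1, cap) :: recs.drop (j + 1) := by
  rw [pvRecs, pvTail, List.drop_eq_getElem_cons hj]

lemma pvTail_advance (recs : List (String × Int)) (j : Nat) :
    pvTail recs (j + 1) (if h2 : j + 1 < recs.length then (recs[j + 1]'h2).2 else 0)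
      = recs.drop (j + 1) := by
  by_cases h2 : j + 1 < recs.length
  · rw [pvTail, List.drop_eq_getElem_cons h2, dif_pos h2]
  · rw [pvTail, List.drop_eq_nil_iff.mpr (by omega)]

lemma pvRecs_zero_advance (recs : List (String × Int)) (j : Nat) (hj : j < recs.length) :
    pvRecs recs j 0
      = pvRecs recs (j + 1) (if h2 : j + 1 < recs.length then (recs[j + 1]'h2).2 else 0) := by
  rw [pvRecs_split recs j hj 0, pvRecs, pvTail_advance]
  have h1 : List.take (j+1) (List.map (fun p => (p.1,(0:Int))) recs)
      = List.take j (List.map (fun p => (p.1,(0:Int))) recs) ++ [((recs[j]'hj).1, 0)] := by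
    rw [List.take_add_one, List.getElem?_map, List.getElem?_eq_getElem hj]
    rfl
  simp [h1]

lemma pvBStep_neg (recs : List (String × Int)) (payer : String)
    (out : PySem.Dict String (PySem.Dict String Int)) (j : Nat) (cap need : Int)
    (h : ¬(0 < need ∧ j < recs.length)) :
    pvBStep recs payer out j cap need = (out, j, cap) := by
  rw [pvBStep, dif_neg h]

lemma pvBStep_pos (recs : List (String × Int)) (payer : String)
    (out : PySem.Dict String (PySem.Dict String Int)) (j : Nat) (cap need : Int)
    (hneed : 0 < need) (hj : j < recs.length) :
    pvBStep recs payer out j cap need =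
      (if cap - min need cap = 0 then
        pvBStep recs payer
          ((out.modify payer PySem.Dict.empty (fun inner => inner.insert (recs[j]'hj).1 (min need cap))).modify
            (recs[j]'hj).1 PySem.Dict.empty (fun inner => inner.insert payer (-(min need cap))))
          (j + 1) (if h2 : j + 1 < recs.length then (recs[j + 1]'h2).2 else 0) (need - min need cap)
      else
        pvBStep recs payer
          ((out.modify payer PySem.Dict.empty (fun inner => inner.insert (recs[j]'hj).1 (min need cap))).modify
            (recs[j]'hj).1 PySem.Dict.empty (fun inner => inner.insert payer (-(min need cap))))
          j (cap - min need cap) (need - min need cap)) := by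
  rw [pvBStep, dif_pos ⟨hneed, hj⟩]

lemma pvDrain (recs : List (String × Int)) (hpos : ∀ p ∈ recs, 0 < p.2)
    (hnd : (recs.map Prod.fst).Nodup) :
    ∀ (j : Nat) (cap need : Int) (m : PySem.Dict String (PySem.Dict String Int)) (payer : String),
    (j < recs.length → 0 < cap) →
    (∃ nf, (pvTail recs j cap).foldl (pvAStep payer) (m, PySem.Dict.mk (pvRecs recs j cap), need)
        = ((pvBStep recs payer m j cap need).1,
           PySem.Dict.mk (pvRecs recs (pvBStep recs payer m j cap need).2.1
             (pvBStep recs payer m j cap need).2.2), nf))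
      ∧ ((pvBStep recs payer m j cap need).2.1 < recs.length →
           0 < (pvBStep recs payer m j cap need).2.2) := by
  suffices H : ∀ (n j : Nat) (cap need : Int) (m : PySem.Dict String (PySem.Dict String Int))
      (payer : String), recs.length - j ≤ n → (j < recs.length → 0 < cap) →
      (∃ nf, (pvTail recs j cap).foldl (pvAStep payer) (m, PySem.Dict.mk (pvRecs recs j cap), need)
          = ((pvBStep recs payer m j cap need).1,
             PySem.Dict.mk (pvRecs recs (pvBStep recs payer m j cap need).2.1
               (pvBStep recs payer m j cap need).2.2), nf))
        ∧ ((pvBStep recs payer m j cap need).2.1 < recs.length →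
             0 < (pvBStep recs payer m j cap need).2.2) by
    exact fun j cap need m payer hc => H (recs.length - j) j cap need m payer le_rfl hc
  intro n
  induction n with
  | zero =>
      intro j cap need m payer hn hc
      have hj : ¬ j < recs.length := by omega
      have htail : pvTail recs j cap = [] := by
        rw [pvTail, List.drop_eq_nil_iff.mpr (by omega)]
      rw [pvBStep_neg recs payer m j cap need (fun h => hj h.2), htail]
      exact ⟨⟨need, rfl⟩, hc⟩
  | succ n ih =>
      intro j cap need m payer hn hc
      by_cases hneed : 0 < need
      · by_cases hj : j < recs.length
        · have hcap := hc hj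
          have htail : pvTail recs j cap = ((recs[j]'hj).1, cap) :: recs.drop (j + 1) := by
            rw [pvTail, List.drop_eq_getElem_cons hj]
          have hkeys : ((recs.take j).map Prod.fst
              ++ (recs[j]'hj).1 :: (recs.drop (j + 1)).map Prod.fst).Nodup := by
            have hsp : recs.map Prod.fst = (recs.take j).map Prod.fst
                ++ (recs[j]'hj).1 :: (recs.drop (j + 1)).map Prod.fst := by
              conv_lhs => rw [← List.take_append_drop j recs]
              rw [List.map_append, List.drop_eq_getElem_cons hj, List.map_cons]
            have hnd' := hnd
            rwa [hsp] at hnd'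
          have hZ : ∀ p ∈ (recs.take j).map (fun p => (p.1, (0 : Int))),
              p.1 ≠ (recs[j]'hj).1 := by
            intro p hp he
            obtain ⟨q, hq, rfl⟩ := List.mem_map.mp hp
            have h1 : q.1 ∈ (recs.take j).map Prod.fst := List.mem_map_of_mem hq
            exact (List.nodup_append.mp hkeys).2.2 q.1 h1 (recs[j]'hj).1 (List.mem_cons_self ..) he
          have hR : ∀ p ∈ recs.drop (j + 1), p.1 ≠ (recs[j]'hj).1 := by
            intro p hp he
            have h2 := (List.nodup_append.mp hkeys).2.1
            rw [List.nodup_cons] at h2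
            exact h2.1 (he ▸ List.mem_map_of_mem hp)
          have hget : (PySem.Dict.mk (pvRecs recs j cap)).getD (recs[j]'hj).1 0 = cap := by
            rw [PySem.Dict.getD_eq_get?_getD, pvRecs_split recs j hj cap, pv_mk_get? _ _ _ _ hZ]
            rfl
          have hins : (PySem.Dict.mk (pvRecs recs j cap)).insert (recs[j]'hj).1 (cap - min need cap)
              = PySem.Dict.mk (pvRecs recs j (cap - min need cap)) := by
            rw [pvRecs_split recs j hj cap, pv_mk_insert _ _ _ _ _ hZ hR, ← pvRecs_split]
          have hstep : pvAStep payer (m, PySem.Dict.mk (pvRecs recs j cap), need) ((recs[j]'hj).1, cap)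
              = ((m.modify payer PySem.Dict.empty (fun inner => inner.insert (recs[j]'hj).1 (min need cap))).modify
                  (recs[j]'hj).1 PySem.Dict.empty (fun inner => inner.insert payer (-(min need cap))),
                 PySem.Dict.mk (pvRecs recs j (cap - min need cap)), need - min need cap) := by
            simp only [pvAStep]
            rw [if_neg (by omega), if_pos (by exact hcap)]
            rw [hget, hins]
          rw [htail, List.foldl_cons, hstep, pvBStep_pos recs payer m j cap need hneed hj]
          by_cases hz : cap - min need cap = 0
          · rw [if_pos hz, hz, pvRecs_zero_advance recs j hj, ← pvTail_advance recs j]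
            exact ih (j + 1) _ (need - min need cap) _ payer (by omega)
              (fun h2 => by rw [dif_pos h2]; exact hpos _ (List.getElem_mem _))
          · rw [if_neg hz]
            have ht : min need cap = need := by omega
            rw [pvBStep_neg recs payer _ j (cap - min need cap) (need - min need cap)
              (by intro hh; omega)]
            refine ⟨⟨need - min need cap, ?_⟩, fun _ => by dsimp only; omega⟩
            rw [pvFoldA_skip_need payer _ _ (by simp; omega)]
        · have htail : pvTail recs j cap = [] := by
            rw [pvTail, List.drop_eq_nil_iff.mpr (by omega)]
          rw [pvBStep_neg recs payer m j cap need (fun h => hj h.2), htail]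
          exact ⟨⟨need, rfl⟩, hc⟩
      · rw [pvBStep_neg recs payer m j cap need (fun h => hneed h.1)]
        exact ⟨⟨need, pvFoldA_skip_need payer _ _ (by simp; omega)⟩, hc⟩

lemma pvRecs_init (l : List (String × Int)) :
    PySem.Dict.mk l
      = PySem.Dict.mk (pvRecs l 0 (if h : 0 < l.length then (l[0]'h).2 else 0)) := by
  cases l with
  | nil => rfl
  | cons p rest => simp [pvRecs, pvTail]

lemma pvOuter (recs : List (String × Int)) (hpos : ∀ p ∈ recs, 0 < p.2)
    (hnd : (recs.map Prod.fst).Nodup) :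
    ∀ (ps : List (String × Int)) (m : PySem.Dict String (PySem.Dict String Int)) (j : Nat) (cap : Int),
    (∀ pa ∈ ps, pa.2 < 0) → (j < recs.length → 0 < cap) →
    (ps.foldl pvAPayer (m, PySem.Dict.mk (pvRecs recs j cap))).1
      = (ps.foldl (fun st pa => pvBStep recs pa.1 st.1 st.2.1 st.2.2 (-pa.2)) (m, j, cap)).1 := by
  intro ps
  induction ps with
  | nil => intro m j cap _ _; rfl
  | cons pa ps ih =>
      intro m j cap hps hc
      have hpa : pa.2 < 0 := hps pa (List.mem_cons_self ..)
      obtain ⟨⟨nf, heq⟩, hinv⟩ := pvDrain recs hpos hnd j cap (-pa.2) m pa.1 hc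
      have hA : pvAPayer (m, PySem.Dict.mk (pvRecs recs j cap)) pa
          = ((pvBStep recs pa.1 m j cap (-pa.2)).1,
             PySem.Dict.mk (pvRecs recs (pvBStep recs pa.1 m j cap (-pa.2)).2.1
               (pvBStep recs pa.1 m j cap (-pa.2)).2.2)) := by
        simp only [pvAPayer]
        rw [show |pa.2| = -pa.2 from abs_of_neg hpa]
        conv_lhs => rw [pvRecs]
        rw [List.foldl_append, pvFoldA_skip_zeros pa.1
          ((recs.take j).map (fun p => (p.1, (0 : Int)))) _
          (by intro p hp; obtain ⟨q, hq, rfl⟩ := List.mem_map.mp hp; exact le_refl 0)]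
        exact congrArg (fun t => (t.1, t.2.1)) heq
      rw [List.foldl_cons, List.foldl_cons, hA]
      exact ih _ _ _ (fun q hq => hps q (List.mem_cons_of_mem _ hq)) hinv

-- ===== VERDICT (by name: the statement is the Claim_ definition above) =====
theorem calculate_net_balances_spec : Claim_equal_calculate_net_balances := by
  intro br _hdom
  unfold Spec_calculate_net_balances calculate_net_balances calculate_net_balances_alt
  dsimp only
  have hkeysd : (((PySem.Dict.ofList br).items).map Prod.fst).Nodup :=
    PySem.Dict.nodup_keys_ofList br
  rw [pv_foldl_insert ((PySem.Dict.ofList br).items)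
    (fun p => (PySem.Dict.ofList p.2).values.sum) hkeysd]
  rw [pv_foldl_insert ((PySem.Dict.ofList br).items)
    (fun _ => (PySem.Dict.empty : PySem.Dict String Int)) hkeysd]
  dsimp only
  rw [List.map_map]
  rw [show List.map ((fun p => (p.1, (PySem.Dict.empty : PySem.Dict String Int)))
        ∘ fun p : String × List (String × Int) => (p.1, (PySem.Dict.ofList p.2).values.sum))
        (PySem.Dict.ofList br).items
      = List.map (fun p => (p.1, (PySem.Dict.empty : PySem.Dict String Int)))
        (PySem.Dict.ofList br).items from rfl]
  set dI := (PySem.Dict.ofList br).items with hdI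
  set netI := List.map (fun p => (p.1, (PySem.Dict.ofList p.2).values.sum)) dI with hnetI
  set recsL := List.filter (fun pv => decide (0 < pv.2)) netI with hrecsL
  set pl := List.filter (fun pv => decide (pv.2 < 0)) netI with hpldef
  set m0 := PySem.Dict.mk (List.map (fun p => (p.1, (PySem.Dict.empty : PySem.Dict String Int))) dI) with hm0
  have hposL : ∀ p ∈ recsL, 0 < p.2 := by
    intro p hp
    have := (List.mem_filter.mp hp).2
    simpa using this
  have hndL : (recsL.map Prod.fst).Nodup := by
    have hnet : (netI.map Prod.fst).Nodup := by rw [hnetI, List.map_map]; exact hkeysd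
    exact List.Nodup.sublist (List.Sublist.map Prod.fst List.filter_sublist) hnet
  have hplneg : ∀ pa ∈ pl, pa.2 < 0 := by
    intro pa hp
    have := (List.mem_filter.mp hp).2
    simpa using this
  have hinv0 : 0 < recsL.length → 0 < (if h : 0 < recsL.length then (recsL[0]'h).2 else 0) := by
    intro h
    rw [dif_pos h]
    exact hposL _ (List.getElem_mem _)
  rw [pvRecs_init recsL]
  exact congrArg (fun d => d.items.map (fun p => (p.1, p.2.items)))
    (pvOuter recsL hposL hndL pl m0 0 _ hplneg hinv0)
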